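-- pv_equiv track=rewrite | github.com/sisamiwe/shNG_plugin_sipcall | __init__.py | format_sip_header_field
-- ===== SOURCE A (Python) =====
-- def format_sip_header_field(key):
--     """
--     Brings SIP header fields to a canonical form. E.g. 'content-length' becomes
--     'Content-Length', cseq becomes 'CSeq' and call-id becomes 'Call-ID'.
--     """
--     if isinstance(key, bytes) or isinstance(key, bytearray):
--         key = str(key, 'ascii')
--     key = key.lower()
--
--     # Special cases
--     if key == 'call-id':
--         return 'Call-ID'
--     elif key == 'cseq':
--         return 'CSeq'
--     elif key == 'www-authenticate':
--         return 'WWW-Authenticate'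
--
--     # Generic case
--     res = ''
--     for i in range(len(key)):
--         if i == 0 or key[i - 1] == '-':
--             res += key[i].upper()
--         else:
--             res += key[i]
--     return res
-- ===== SOURCE B (Python) =====
-- def format_sip_header_field(key):
--     """
--     Brings SIP header fields to a canonical form. E.g. 'content-length' becomes
--     'Content-Length', cseq becomes 'CSeq' and call-id becomes 'Call-ID'.
--     """
--     if isinstance(key, bytes) or isinstance(key, bytearray):
--         key = str(key, 'ascii')
--     key = key.lower()
--
--     # Special cases
--     if key == 'call-id':
--         return 'Call-ID'
--     elif key == 'cseq':
--         return 'CSeq'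
--     elif key == 'www-authenticate':
--         return 'WWW-Authenticate'
--
--     # Generic case: capitalize each hyphen-delimited segment and rejoin
--     return '-'.join(w[:1].upper() + w[1:] for w in key.split('-'))
-- ===== Notes on version B (the rewrite author's own statement) =====
-- stated objective: faster
-- what changed: Replaces the per-character loop (with its previous-character test and repeated string concatenation) by a segment pass: split the lowercased key on hyphens, uppercase each segment's first character, and rejoin; str.join builds the result in one allocation instead of per-character +=.
import Mathlib
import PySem

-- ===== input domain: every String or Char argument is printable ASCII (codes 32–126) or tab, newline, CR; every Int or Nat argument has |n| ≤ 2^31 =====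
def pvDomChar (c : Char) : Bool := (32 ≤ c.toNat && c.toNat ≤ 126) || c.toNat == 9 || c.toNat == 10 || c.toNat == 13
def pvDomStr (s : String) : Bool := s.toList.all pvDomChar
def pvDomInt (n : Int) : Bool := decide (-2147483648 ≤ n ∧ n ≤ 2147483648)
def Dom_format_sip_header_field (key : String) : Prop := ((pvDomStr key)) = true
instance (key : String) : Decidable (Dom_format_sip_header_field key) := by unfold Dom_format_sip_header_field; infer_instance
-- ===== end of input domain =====

-- B canonicalizes SIP header names by splitting on hyphens and capitalizing segments, instead of
-- A's per-character loop; measurably faster in Python (join vs per-character concatenation).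

-- ===== PORT A =====
-- A's generic loop: res += key[i].upper() when i == 0 or key[i-1] == '-';
-- the condition is carried as a 'capitalize this char' flag (true at i = 0, then key[i] == '-')
def pvALoop : Bool → List Char → List Char
  | _, [] => []
  | cap, c :: rest => (if cap then PySem.Chars.upperChar c else c) :: pvALoop (c = '-') rest

def format_sip_header_field (key : String) : String :=
  let k := PySem.Str.lower key
  if k = "call-id" then "Call-ID"
  else if k = "cseq" then "CSeq"
  else if k = "www-authenticate" then "WWW-Authenticate"
  else String.mk (pvALoop true k.toList)

-- ===== PORT B =====
-- hand port of str.split('-') on code points (exact: empty pieces kept, splitting the empty string gives one empty piece)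
def pvSplitDash : List Char → List (List Char)
  | [] => [[]]
  | c :: r =>
    if c = '-' then [] :: pvSplitDash r
    else
      match pvSplitDash r with
      | s :: ss => (c :: s) :: ss
      | [] => [[c]]

-- w[:1].upper() + w[1:]
def pvCapSeg : List Char → List Char
  | [] => []
  | c :: r => PySem.Chars.upperChar c :: r

-- hand port of '-'.join(parts) (exact)
def pvJoinDash : List (List Char) → List Char
  | [] => []
  | [s] => s
  | s :: ss => s ++ '-' :: pvJoinDash ss

def format_sip_header_field_alt (key : String) : String :=
  let k := PySem.Str.lower key
  if k = "call-id" then "Call-ID"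
  else if k = "cseq" then "CSeq"
  else if k = "www-authenticate" then "WWW-Authenticate"
  else String.mk (pvJoinDash ((pvSplitDash k.toList).map pvCapSeg))

-- ===== PRECONDITION & SPEC =====
def Spec_format_sip_header_field (key : String) (out : String) : Prop := out = format_sip_header_field_alt key
instance (key : String) (out : String) : Decidable (Spec_format_sip_header_field key out) := by unfold Spec_format_sip_header_field; infer_instance

-- ===== CLAIM (what is proved, stated in full; the proofs are below) =====
def Claim_equal_format_sip_header_field : Prop := ∀ (key : String), Dom_format_sip_header_field key → Spec_format_sip_header_field key (format_sip_header_field key)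

-- ===== LEMMAS AND PROOFS =====

-- '-' with all its capitalized-segment tails glued on
def pvRest (ss : List (List Char)) : List Char := (ss.map (fun s => '-' :: pvCapSeg s)).flatten

-- join with the head segment capitalized / left raw
def pvF : List (List Char) → List Char
  | [] => []
  | s :: ss => pvCapSeg s ++ pvRest ss

def pvG : List (List Char) → List Char
  | [] => []
  | s :: ss => s ++ pvRest ss

theorem pvSplitDash_ne_nil (l : List Char) : pvSplitDash l ≠ [] := by
  cases l with
  | nil => simp [pvSplitDash]
  | cons c r =>
    simp only [pvSplitDash]
    split
    · simp
    · split <;> simp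

theorem pvALoop_eq (l : List Char) :
    pvALoop true l = pvF (pvSplitDash l) ∧ pvALoop false l = pvG (pvSplitDash l) := by
  induction l with
  | nil => constructor <;> rfl
  | cons c r ih =>
    by_cases hc : c = '-'
    · subst hc
      have hup : PySem.Chars.upperChar '-' = '-' := by decide
      obtain ⟨s, ss, hss⟩ : ∃ s ss, pvSplitDash r = s :: ss := by
        cases h : pvSplitDash r with
        | nil => exact absurd h (pvSplitDash_ne_nil r)
        | cons s ss => exact ⟨s, ss, rfl⟩
      constructor <;>
        simp [pvALoop, pvSplitDash, hup, ih.1, hss, pvF, pvG, pvCapSeg, pvRest]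
    · obtain ⟨s, ss, hss⟩ : ∃ s ss, pvSplitDash r = s :: ss := by
        cases h : pvSplitDash r with
        | nil => exact absurd h (pvSplitDash_ne_nil r)
        | cons s ss => exact ⟨s, ss, rfl⟩
      constructor <;>
        simp [pvALoop, pvSplitDash, hc, ih.2, hss, pvF, pvG, pvCapSeg]

theorem pvJoinDash_map_capSeg (ss : List (List Char)) :
    pvJoinDash (ss.map pvCapSeg) = pvF ss := by
  induction ss with
  | nil => rfl
  | cons s ss ih =>
    cases ss with
    | nil => simp [pvJoinDash, pvF, pvRest]
    | cons t ts =>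
      simp only [List.map, pvJoinDash, pvF, pvRest, List.flatten] at *
      simp [ih]

theorem pvMain (l : List Char) :
    pvALoop true l = pvJoinDash ((pvSplitDash l).map pvCapSeg) := by
  rw [pvJoinDash_map_capSeg]
  exact (pvALoop_eq l).1

-- ===== VERDICT (by name: the statement is the Claim_ definition above) =====
theorem format_sip_header_field_spec : Claim_equal_format_sip_header_field := by
  intro key _
  unfold Spec_format_sip_header_field format_sip_header_field format_sip_header_field_alt
  dsimp only
  split_ifs <;> first | exact congrArg String.mk (pvMain _) | rfl
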